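-- pv_equiv track=rewrite | github.com/sori-ai/SORI-Leaderboard | scripts/generate_readme.py | generate_sample_gallery
-- ===== SOURCE A (Python) =====
-- def generate_sample_gallery(samples_data: dict) -> str:
--     """Generate sample gallery Markdown (for GT MIDI)"""
--     samples = samples_data.get("samples_gt_midi", [])
--     if not samples:
--         return "*Samples will be displayed here when added.*"
--
--     output_lines = []
--     difficulty_names = {
--         "beginner": "Beginner",
--         "intermediate": "Intermediate",
--         "advanced": "Advanced"
--     }
--
--     for i, sample in enumerate(samples, 1):
--         diff_name = difficulty_names.get(sample.get("difficulty", ""), sample.get("difficulty", ""))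
--         title = sample.get("title", f"Sample {i}")
--         diff_str = f" ({diff_name})" if diff_name else ""
--
--         output_lines.append(f"### Sample {i}: {title}{diff_str}")
--         output_lines.append("")
--         output_lines.append("---")
--         output_lines.append("")
--
--     # 마지막 구분선 제거
--     if output_lines and output_lines[-1] == "":
--         output_lines.pop()
--     if output_lines and output_lines[-1] == "---":
--         output_lines.pop()
--
--     return "\n".join(output_lines) if output_lines else "*Samples will be displayed here when added.*"
-- ===== SOURCE B (Python) =====
-- def generate_sample_gallery(samples_data: dict) -> str:
--     """Generate sample gallery Markdown (for GT MIDI)"""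
--     samples = samples_data.get("samples_gt_midi", [])
--     if not samples:
--         return "*Samples will be displayed here when added.*"
--
--     difficulty_names = {
--         "beginner": "Beginner",
--         "intermediate": "Intermediate",
--         "advanced": "Advanced",
--     }
--
--     def rec(i, rest):
--         # build the final Markdown directly, recursively, with no line list
--         sample = rest[0]
--         diff = sample.get("difficulty", "")
--         diff_name = difficulty_names.get(diff, diff)
--         title = sample.get("title", f"Sample {i}")
--         head = f"### Sample {i}: {title}"
--         if diff_name:
--             head += f" ({diff_name})"
--         if len(rest) == 1:
--             return head + "\n"
--         return head + "\n\n---\n\n" + rec(i + 1, rest[1:])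
--
--     return rec(1, samples)
-- ===== Notes on version B (the rewrite author's own statement) =====
-- stated objective: alternative
-- what changed: A builds a flat line list (four lines per sample), pops the trailing '' and '---', then joins with '\n'; B never builds a line list: a recursive function over the samples emits each header and the inter-sample separator directly into the result string, recursion on the list structure replacing the append/trim/join pipeline.
import Mathlib
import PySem

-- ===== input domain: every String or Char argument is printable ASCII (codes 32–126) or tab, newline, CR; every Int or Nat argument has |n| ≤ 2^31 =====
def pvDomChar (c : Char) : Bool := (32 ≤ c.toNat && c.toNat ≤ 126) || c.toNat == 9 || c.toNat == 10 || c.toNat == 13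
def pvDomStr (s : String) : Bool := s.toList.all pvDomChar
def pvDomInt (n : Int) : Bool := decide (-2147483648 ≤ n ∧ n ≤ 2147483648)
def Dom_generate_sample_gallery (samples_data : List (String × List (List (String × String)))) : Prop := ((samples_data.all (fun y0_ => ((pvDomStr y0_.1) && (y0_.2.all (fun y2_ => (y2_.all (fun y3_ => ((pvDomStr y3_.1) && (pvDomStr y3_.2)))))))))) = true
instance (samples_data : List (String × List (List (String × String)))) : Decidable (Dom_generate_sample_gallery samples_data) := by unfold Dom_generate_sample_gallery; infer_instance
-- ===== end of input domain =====

-- B replaces A's four-lines-per-sample list construction with append/trim/join by a direct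
-- structural recursion that emits the result string sample by sample (alternative decomposition).


-- ===== PORT A =====
def pvDifficultyNames : PySem.Dict String String :=
  PySem.Dict.ofList [("beginner", "Beginner"), ("intermediate", "Intermediate"), ("advanced", "Advanced")]

-- A's loop: for each sample append the header line, "", "---", "" to output_lines
def pvLoopA (i : Int) (samples : List (List (String × String))) (output_lines : List String) : List String :=
  match samples with
  | [] => output_lines
  | sample :: rest =>
    let diff := PySem.Dict.getD ⟨sample⟩ "difficulty" ""
    let diff_name := PySem.Dict.getD pvDifficultyNames diff diff
    let title := PySem.Dict.getD ⟨sample⟩ "title" ("Sample " ++ PySem.Int.toStr i)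
    let diff_str := if diff_name ≠ "" then " (" ++ diff_name ++ ")" else ""
    pvLoopA (i + 1) rest
      (output_lines ++ ["### Sample " ++ PySem.Int.toStr i ++ ": " ++ title ++ diff_str, "", "---", ""])

def generate_sample_gallery (samples_data : List (String × List (List (String × String)))) : String :=
  let samples := PySem.Dict.getD ⟨samples_data⟩ "samples_gt_midi" []
  if samples = [] then "*Samples will be displayed here when added.*"
  else
    let output_lines := pvLoopA 1 samples []
    -- if output_lines and output_lines[-1] == "": output_lines.pop()
    let output_lines := if output_lines ≠ [] ∧ output_lines.getLast? = some "" then output_lines.dropLast else output_lines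
    -- if output_lines and output_lines[-1] == "---": output_lines.pop()
    let output_lines := if output_lines ≠ [] ∧ output_lines.getLast? = some "---" then output_lines.dropLast else output_lines
    if output_lines ≠ [] then PySem.Str.join "\n" output_lines
    else "*Samples will be displayed here when added.*"

-- ===== PORT B =====
-- Source B's rec(i, rest): builds the Markdown directly, recursively, with no line list
def pvRecB (i : Int) (sample : List (String × String)) (rest : List (List (String × String))) : String :=
  let diff := PySem.Dict.getD ⟨sample⟩ "difficulty" ""
  let diff_name := PySem.Dict.getD pvDifficultyNames diff diff
  let title := PySem.Dict.getD ⟨sample⟩ "title" ("Sample " ++ PySem.Int.toStr i)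
  let head := "### Sample " ++ PySem.Int.toStr i ++ ": " ++ title
  let head := if diff_name ≠ "" then head ++ " (" ++ diff_name ++ ")" else head
  match rest with
  | [] => head ++ "\n"
  | s :: r => head ++ "\n\n---\n\n" ++ pvRecB (i + 1) s r

def generate_sample_gallery_alt (samples_data : List (String × List (List (String × String)))) : String :=
  match PySem.Dict.getD ⟨samples_data⟩ "samples_gt_midi" [] with
  | [] => "*Samples will be displayed here when added.*"
  | s :: rest => pvRecB 1 s rest

-- ===== PRECONDITION & SPEC =====
def Spec_generate_sample_gallery (samples_data : List (String × List (List (String × String)))) (out : String) : Prop := out = generate_sample_gallery_alt samples_data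
instance (samples_data : List (String × List (List (String × String)))) (out : String) : Decidable (Spec_generate_sample_gallery samples_data out) := by unfold Spec_generate_sample_gallery; infer_instance

-- ===== CLAIM (what is proved, stated in full; the proofs are below) =====
def Claim_equal_generate_sample_gallery : Prop := ∀ (samples_data : List (String × List (List (String × String)))), Dom_generate_sample_gallery samples_data → Spec_generate_sample_gallery samples_data (generate_sample_gallery samples_data)

-- ===== LEMMAS AND PROOFS =====

-- the header line A's loop produces for sample number i
def pvHeader (i : Int) (sample : List (String × String)) : String :=
  let diff := PySem.Dict.getD ⟨sample⟩ "difficulty" ""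
  let diff_name := PySem.Dict.getD pvDifficultyNames diff diff
  let title := PySem.Dict.getD ⟨sample⟩ "title" ("Sample " ++ PySem.Int.toStr i)
  let diff_str := if diff_name ≠ "" then " (" ++ diff_name ++ ")" else ""
  "### Sample " ++ PySem.Int.toStr i ++ ": " ++ title ++ diff_str

-- the raw line list A's loop produces
def pvBlocks (i : Int) : List (List (String × String)) → List String
  | [] => []
  | sample :: rest => [pvHeader i sample, "", "---", ""] ++ pvBlocks (i + 1) rest

-- the trimmed line list A ends up joining: header, "", "---", "" … header, ""
def pvBody (i : Int) (samples : List (List (String × String))) : List String :=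
  match samples with
  | [] => []
  | [sample] => [pvHeader i sample, ""]
  | sample :: rest => [pvHeader i sample, "", "---", ""] ++ pvBody (i + 1) rest

theorem pvLoopA_eq_blocks (samples : List (List (String × String))) :
    ∀ (i : Int) (acc : List String), pvLoopA i samples acc = acc ++ pvBlocks i samples := by
  induction samples with
  | nil => intro i acc; simp [pvLoopA, pvBlocks]
  | cons s rest ih =>
    intro i acc
    simp only [pvLoopA, pvBlocks]
    rw [ih]
    simp [pvHeader]

theorem pvBlocks_eq_body (samples : List (List (String × String))) (h : samples ≠ []) :
    ∀ i : Int, pvBlocks i samples = pvBody i samples ++ ["---", ""] := by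
  induction samples with
  | nil => exact absurd rfl h
  | cons s rest ih =>
    intro i
    cases rest with
    | nil => simp [pvBlocks, pvBody]
    | cons t rest' =>
      rw [show pvBlocks i (s :: t :: rest')
            = [pvHeader i s, "", "---", ""] ++ pvBlocks (i + 1) (t :: rest') from rfl,
          ih (by simp) (i + 1),
          show pvBody i (s :: t :: rest')
            = [pvHeader i s, "", "---", ""] ++ pvBody (i + 1) (t :: rest') from rfl]
      simp

theorem pvBody_ne_nil (i : Int) (samples : List (List (String × String))) (h : samples ≠ []) :
    pvBody i samples ≠ [] := by
  cases samples with
  | nil => exact absurd rfl h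
  | cons s rest => cases rest <;> simp [pvBody]

-- pvRecB's head equals A's header line
theorem pvRecB_head (i : Int) (sample : List (String × String)) :
    (let diff := PySem.Dict.getD ⟨sample⟩ "difficulty" ""
     let diff_name := PySem.Dict.getD pvDifficultyNames diff diff
     let title := PySem.Dict.getD ⟨sample⟩ "title" ("Sample " ++ PySem.Int.toStr i)
     let head := "### Sample " ++ PySem.Int.toStr i ++ ": " ++ title
     if diff_name ≠ "" then head ++ " (" ++ diff_name ++ ")" else head) = pvHeader i sample := by
  simp only [pvHeader]
  split_ifs <;> simp [String.append_assoc]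

theorem pv_join_body (rest : List (List (String × String))) :
    ∀ (i : Int) (s : List (String × String)),
      PySem.Str.join "\n" (pvBody i (s :: rest)) = pvRecB i s rest := by
  induction rest with
  | nil =>
    intro i s
    show PySem.Str.join "\n" [pvHeader i s, ""] = pvRecB i s []
    rw [pvRecB, pvRecB_head i s]
    apply String.ext
    simp [PySem.Str.join, PySem.Chars.join, List.intercalate, List.intersperse]
  | cons t rest' ih =>
    intro i s
    have hthis := ih (i + 1) t
    rw [show pvBody i (s :: t :: rest')
          = [pvHeader i s, "", "---", ""] ++ pvBody (i + 1) (t :: rest') from rfl,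
        pvRecB, pvRecB_head i s, ← hthis]
    cases hb : pvBody (i + 1) (t :: rest') with
    | nil => exact absurd hb (pvBody_ne_nil _ _ (by simp))
    | cons b bs =>
      apply String.ext
      simp only [PySem.Str.join, PySem.Chars.join, List.intercalate, List.intersperse,
        List.map_cons, List.cons_append, List.nil_append, String.toList_append,
        String.toList_ofList,
        show "\n".toList = ['\n'] from rfl,
        show "\n\n---\n\n".toList = ['\n', '\n', '-', '-', '-', '\n', '\n'] from rfl,
        show "".toList = [] from rfl, show "---".toList = ['-', '-', '-'] from rfl]
      simp

-- ===== VERDICT (by name: the statement is the Claim_ definition above) =====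
theorem generate_sample_gallery_spec : Claim_equal_generate_sample_gallery := by
  intro samples_data _
  unfold Spec_generate_sample_gallery generate_sample_gallery generate_sample_gallery_alt
  cases hs : PySem.Dict.getD (⟨samples_data⟩ : PySem.Dict String (List (List (String × String)))) "samples_gt_midi" [] with
  | nil => simp
  | cons s rest =>
    simp only [if_neg (by simp : ¬(s :: rest : List (List (String × String))) = [])]
    rw [pvLoopA_eq_blocks, pvBlocks_eq_body _ (by simp),
        show ([] : List String) ++ (pvBody 1 (s :: rest) ++ ["---", ""])
          = (pvBody 1 (s :: rest) ++ ["---"]) ++ [""] by simp]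
    have hbody := pvBody_ne_nil 1 (s :: rest) (by simp)
    have c1 : ((pvBody 1 (s :: rest) ++ ["---"]) ++ [""] ≠ []) ∧
        ((pvBody 1 (s :: rest) ++ ["---"]) ++ [""]).getLast? = some "" := by simp
    rw [if_pos c1, List.dropLast_concat]
    have c2 : (pvBody 1 (s :: rest) ++ ["---"] ≠ []) ∧
        (pvBody 1 (s :: rest) ++ ["---"]).getLast? = some "---" := by simp
    rw [if_pos c2, List.dropLast_concat, if_pos hbody]
    exact pv_join_body rest 1 s
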